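-- pv_equiv track=rewrite | github.com/Mari-eng02/Research_project_AI | ai_analysis.py | encode64
-- ===== SOURCE A (Python) =====
-- def encode64(data):
--     """PlantUML specific base64 encoding."""
--     res = ""
--     alphabet = "0123456789ABCDEFGHIJKLMNOPQRSTUVWXYZabcdefghijklmnopqrstuvwxyz-_"
--     for i in range(0, len(data), 3):
--         if i+2 == len(data):
--             res += append3bytes(data[i], data[i+1], 0, alphabet)
--         elif i+1 == len(data):
--             res += append3bytes(data[i], 0, 0, alphabet)
--         else:
--             res += append3bytes(data[i], data[i+1], data[i+2], alphabet)
--     return res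
--
-- def append3bytes(b1, b2, b3, alphabet):
--     c1 = b1 >> 2
--     c2 = ((b1 & 0x3) << 4) | (b2 >> 4)
--     c3 = ((b2 & 0xF) << 2) | (b3 >> 6)
--     c4 = b3 & 0x3F
--     return alphabet[c1] + alphabet[c2] + alphabet[c3] + alphabet[c4]
-- ===== SOURCE B (Python) =====
-- def encode64(data):
--     """PlantUML specific base64 encoding."""
--     alphabet = "0123456789ABCDEFGHIJKLMNOPQRSTUVWXYZabcdefghijklmnopqrstuvwxyz-_"
--     n = len(data)
--     pad = (-n) % 3
--     num = 0
--     for b in data: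
--         num = num * 256 + b
--     num *= 256 ** pad
--     total_bits = (n + pad) * 8
--     out = []
--     for k in range((n + pad) // 3 * 4):
--         out.append(alphabet[(num >> (total_bits - 6 * (k + 1))) & 0x3F])
--     return "".join(out)
-- ===== Notes on version B (the rewrite author's own statement) =====
-- stated objective: alternative
-- what changed: A encodes per 3-byte group with branching and a 4-character helper; B builds one big integer from all (zero-padded) bytes and emits each character by masking a 6-bit window of it in a single flat scan.
-- outside the precondition, e.g. on encode64([0, -16, 0]): A returns '0_00', B returns '__00'; on encode64([300]): A raises IndexError, B returns 'B000'
import Mathlib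
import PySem

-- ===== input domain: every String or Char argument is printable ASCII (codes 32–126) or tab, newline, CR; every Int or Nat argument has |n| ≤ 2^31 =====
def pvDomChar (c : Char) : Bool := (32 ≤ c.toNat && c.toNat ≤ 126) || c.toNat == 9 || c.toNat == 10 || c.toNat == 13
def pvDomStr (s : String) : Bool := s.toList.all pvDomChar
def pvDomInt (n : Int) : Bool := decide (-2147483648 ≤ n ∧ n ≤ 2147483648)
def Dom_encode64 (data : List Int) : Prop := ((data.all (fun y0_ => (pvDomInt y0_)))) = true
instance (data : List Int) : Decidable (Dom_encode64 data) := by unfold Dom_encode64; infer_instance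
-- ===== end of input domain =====

-- B replaces A's per-group branching and 4-char helper by one big integer built from the
-- bytes and a flat scan of 6-bit windows (objective: alternative decomposition, same cost).

-- ===== PORT A =====
-- Python strings are ported as List Char (PySem convention); the final value is wrapped in String.mk.
def pvAlphabet : List Char :=
  "0123456789ABCDEFGHIJKLMNOPQRSTUVWXYZabcdefghijklmnopqrstuvwxyz-_".toList

-- alphabet[c] (one-character string); the none branch is Python's IndexError, excluded by Pre_encode64
def pvChar1 (alphabet : List Char) (c : Int) : List Char :=
  match PySem.List.pyGet? alphabet c with
  | some ch => [ch]
  | none => []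

def append3bytes (b1 b2 b3 : Int) (alphabet : List Char) : List Char :=
  let c1 : Int := b1 >>> (2 : Nat)
  let c2 : Int := PySem.Int.bor ((PySem.Int.band b1 0x3) <<< (4 : Nat)) (b2 >>> (4 : Nat))
  let c3 : Int := PySem.Int.bor ((PySem.Int.band b2 0xF) <<< (2 : Nat)) (b3 >>> (6 : Nat))
  let c4 : Int := PySem.Int.band b3 0x3F
  pvChar1 alphabet c1 ++ pvChar1 alphabet c2 ++ pvChar1 alphabet c3 ++ pvChar1 alphabet c4

-- the loop 'for i in range(0, len(data), 3)' with A's two tail branches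
def encode64Go (alphabet : List Char) : List Int → List Char
  | [] => []
  | [b1] => append3bytes b1 0 0 alphabet            -- i+1 == len(data)
  | [b1, b2] => append3bytes b1 b2 0 alphabet       -- i+2 == len(data)
  | b1 :: b2 :: b3 :: rest => append3bytes b1 b2 b3 alphabet ++ encode64Go alphabet rest

def encode64 (data : List Int) : String :=
  String.mk (encode64Go pvAlphabet data)

-- ===== PORT B =====
-- '>> s' is ported as '>>>' and '& 0x3F' as PySem.Int.band (both Python-exact);
-- .getD ' ' is never the default: the 6-bit index is always inside the 64-char alphabet.
def encode64_alt (data : List Int) : String :=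
  let n : Int := data.length
  let pad : Nat := (PySem.Int.mod (-n) 3).toNat
  let num : Int := data.foldl (fun acc b => acc * 256 + b) 0
  let num : Int := num * 256 ^ pad
  let totalBits : Nat := (data.length + pad) * 8
  String.mk ((List.range ((data.length + pad) / 3 * 4)).map (fun k =>
    (PySem.List.pyGet? pvAlphabet
      (PySem.Int.band (num >>> (totalBits - 6 * (k + 1))) 0x3F)).getD ' '))

-- ===== PRECONDITION & SPEC =====
-- Pre_ restricts the input to genuine byte values 0..255 — the natural domain of a byte
-- encoder: outside it A's alphabet indexing mostly raises IndexError (and where a small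
-- negative element still returns, the value comes from Python's negative-index wraparound,
-- which neither implementation specifies).
def Pre_encode64 (data : List Int) : Prop := ∀ b ∈ data, 0 ≤ b ∧ b < 256
instance (data : List Int) : Decidable (Pre_encode64 data) := by unfold Pre_encode64; infer_instance
def pvWitness_encode64 : List Int := [72, 101, 108, 108, 111]
def Spec_encode64 (data : List Int) (out : String) : Prop := out = encode64_alt data
instance (data : List Int) (out : String) : Decidable (Spec_encode64 data out) := by unfold Spec_encode64; infer_instance

-- ===== CLAIM (what is proved, stated in full; the proofs are below) =====
def Claim_equal_encode64 : Prop := ∀ (data : List Int), Dom_encode64 data → Pre_encode64 data → Spec_encode64 data (encode64 data)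

-- ===== LEMMAS AND PROOFS =====

-- Nat-level index sequences of the two algorithms
def pvGrpN (a1 a2 a3 : Nat) : List Nat :=
  [a1 / 4, a1 % 4 * 16 + a2 / 16, a2 % 16 * 4 + a3 / 64, a3 % 64]

def pvAidxN : List Nat → List Nat
  | [] => []
  | [a1] => pvGrpN a1 0 0
  | [a1, a2] => pvGrpN a1 a2 0
  | a1 :: a2 :: a3 :: rest => pvGrpN a1 a2 a3 ++ pvAidxN rest

def pvVal (as : List Nat) : Nat := as.foldl (fun a b => a * 256 + b) 0

def pvPad (l : Nat) : Nat := (3 - l % 3) % 3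

def pvBidxN (as : List Nat) : List Nat :=
  (List.range ((as.length + pvPad as.length) / 3 * 4)).map
    (fun k => pvVal as * 256 ^ pvPad as.length /
      2 ^ ((as.length + pvPad as.length) * 8 - 6 * (k + 1)) % 64)

def pvCharF (c : Nat) : Char := pvAlphabet.getD c ' '

lemma pvShiftrCast (a k : Nat) : ((a : Int) >>> k) = ((a >>> k : Nat) : Int) :=
  Int.mem_toNat?.mp rfl

lemma pvShiftlCast (a k : Nat) : ((a : Int) <<< k) = ((a <<< k : Nat) : Int) :=
  Int.mem_toNat?.mp rfl

lemma pvVal_init (as : List Nat) (A : Nat) :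
    as.foldl (fun a b => a * 256 + b) A = A * 256 ^ as.length + pvVal as := by
  induction as generalizing A with
  | nil => simp [pvVal]
  | cons a as ih =>
    show List.foldl (fun a b => a * 256 + b) (A * 256 + a) as
        = A * 256 ^ (a :: as).length + pvVal (a :: as)
    rw [ih, show pvVal (a :: as) = List.foldl (fun a b => a * 256 + b) (0 * 256 + a) as from rfl,
        ih]
    simp [List.length_cons]
    ring

lemma pvVal_lt (as : List Nat) (h : ∀ a ∈ as, a < 256) : pvVal as < 256 ^ as.length := by
  induction as with
  | nil => simp [pvVal]
  | cons a as ih =>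
    have ha : a < 256 := h a (by simp)
    have hv := ih (fun x hx => h x (by simp [hx]))
    show List.foldl (fun a b => a * 256 + b) (0 * 256 + a) as < 256 ^ (a :: as).length
    rw [pvVal_init, List.length_cons, pow_succ,
        show (0 * 256 + a) = a from by ring]
    nlinarith [hv, ha]

lemma hiWin (G R tbr t : Nat) (hR : R < 2 ^ tbr) :
    (G * 2 ^ tbr + R) / 2 ^ (tbr + t) % 64 = G / 2 ^ t % 64 := by
  rw [pow_add, ← Nat.div_div_eq_div_mul, mul_comm G (2 ^ tbr),
      Nat.mul_add_div (Nat.two_pow_pos tbr), Nat.div_eq_of_lt hR, add_zero]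

lemma loWin (G R e d : Nat) :
    (G * 2 ^ (e + (6 + d)) + R) / 2 ^ e % 64 = R / 2 ^ e % 64 := by
  rw [pow_add, ← mul_assoc, mul_comm G (2 ^ e), mul_assoc,
      Nat.mul_add_div (Nat.two_pow_pos e)]
  rw [pow_add, show (2:Nat) ^ 6 = 64 from by norm_num,
      show G * (64 * 2 ^ d) = G * 2 ^ d * 64 from by ring]
  omega

lemma winEq (N e e' : Nat) (he : e = e') : N / 2 ^ e % 64 = N / 2 ^ e' % 64 := by rw [he]

lemma pvAidxN_eq_pvBidxN (as : List Nat) (h : ∀ a ∈ as, a < 256) :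
    pvAidxN as = pvBidxN as := by
  induction as using pvAidxN.induct with
  | case1 => simp [pvAidxN, pvBidxN, pvPad]
  | case2 a1 =>
    have h1 : a1 < 256 := h a1 (by simp)
    simp only [pvAidxN, pvBidxN, pvGrpN, pvVal, pvPad]
    norm_num [List.range_succ]
    refine ⟨?_, ?_, ?_, ?_⟩ <;> omega
  | case3 a1 a2 =>
    have h1 : a1 < 256 := h a1 (by simp)
    have h2 : a2 < 256 := h a2 (by simp)
    simp only [pvAidxN, pvBidxN, pvGrpN, pvVal, pvPad]
    norm_num [List.range_succ]
    refine ⟨?_, ?_, ?_, ?_⟩ <;> omega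
  | case4 a1 a2 a3 rest ih =>
    have h1 : a1 < 256 := h a1 (by simp)
    have h2 : a2 < 256 := h a2 (by simp)
    have h3 : a3 < 256 := h a3 (by simp)
    have hr : ∀ a ∈ rest, a < 256 := fun x hx => h x (by simp [hx])
    have hvlt := pvVal_lt rest hr
    -- abbreviations
    have hval : pvVal (a1 :: a2 :: a3 :: rest)
        = ((a1 * 256 + a2) * 256 + a3) * 256 ^ rest.length + pvVal rest := by
      simp only [pvVal, List.foldl_cons]
      rw [pvVal_init, show List.foldl (fun a b => a * 256 + b) 0 rest = pvVal rest from rfl]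
      ring
    have hdvd : (rest.length + pvPad rest.length) % 3 = 0 := by
      simp only [pvPad]; omega
    have h256 : ∀ m : Nat, (256 : Nat) ^ m = 2 ^ (m * 8) := by
      intro m
      rw [show (256:Nat) = 2 ^ 8 from by norm_num, ← pow_mul, Nat.mul_comm]
    have hR : pvVal rest * 256 ^ pvPad rest.length
        < 2 ^ ((rest.length + pvPad rest.length) * 8) := by
      calc pvVal rest * 256 ^ pvPad rest.length
          < 256 ^ rest.length * 256 ^ pvPad rest.length :=
            Nat.mul_lt_mul_of_pos_right hvlt (pow_pos (by norm_num) _)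
        _ = 2 ^ ((rest.length + pvPad rest.length) * 8) := by
            rw [← pow_add, h256]
    show pvGrpN a1 a2 a3 ++ pvAidxN rest = pvBidxN (a1 :: a2 :: a3 :: rest)
    rw [ih hr]
    simp only [pvBidxN, List.length_cons]
    have hpad' : pvPad (rest.length + 1 + 1 + 1) = pvPad rest.length := by
      simp only [pvPad]; omega
    have hcnt' : (rest.length + 1 + 1 + 1 + pvPad rest.length) / 3 * 4
        = 4 + (rest.length + pvPad rest.length) / 3 * 4 := by omega
    have hnum : (((a1 * 256 + a2) * 256 + a3) * 256 ^ rest.length + pvVal rest)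
          * 256 ^ pvPad rest.length
        = ((a1 * 256 + a2) * 256 + a3) * 2 ^ ((rest.length + pvPad rest.length) * 8)
          + pvVal rest * 256 ^ pvPad rest.length := by
      rw [add_mul, mul_assoc, ← pow_add, h256]
    simp only [hpad', hval, hnum, hcnt']
    rw [List.range_add, List.map_append, List.map_map]
    congr 1
    · rw [show List.range 4 = [0, 1, 2, 3] from rfl]
      simp only [List.map_cons, List.map_nil, pvGrpN, List.cons.injEq]
      refine ⟨?_, ?_, ?_, ?_, trivial⟩
      · rw [winEq _ _ ((rest.length + pvPad rest.length) * 8 + 18) (by omega),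
            hiWin _ _ _ _ hR, show (2:Nat) ^ 18 = 262144 from by norm_num]
        omega
      · rw [winEq _ _ ((rest.length + pvPad rest.length) * 8 + 12) (by omega),
            hiWin _ _ _ _ hR, show (2:Nat) ^ 12 = 4096 from by norm_num]
        omega
      · rw [winEq _ _ ((rest.length + pvPad rest.length) * 8 + 6) (by omega),
            hiWin _ _ _ _ hR, show (2:Nat) ^ 6 = 64 from by norm_num]
        omega
      · rw [winEq _ _ ((rest.length + pvPad rest.length) * 8 + 0) (by omega),
            hiWin _ _ _ _ hR, pow_zero]
        omega
    · apply List.map_congr_left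
      intro k hk
      have hk' : k < (rest.length + pvPad rest.length) / 3 * 4 := List.mem_range.mp hk
      simp only [Function.comp_apply]
      rw [winEq _ ((rest.length + 1 + 1 + 1 + pvPad rest.length) * 8 - 6 * (4 + k + 1))
            ((rest.length + pvPad rest.length) * 8 - 6 * (k + 1)) (by omega)]
      have hlo := loWin ((a1 * 256 + a2) * 256 + a3) (pvVal rest * 256 ^ pvPad rest.length)
        ((rest.length + pvPad rest.length) * 8 - 6 * (k + 1)) (6 * k)
      rw [show ((rest.length + pvPad rest.length) * 8 - 6 * (k + 1)) + (6 + 6 * k)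
          = (rest.length + pvPad rest.length) * 8 from by omega] at hlo
      exact hlo.symm

set_option maxRecDepth 8192 in
lemma pvChar1_eq (c : Nat) (hc : c < 64) :
    pvChar1 pvAlphabet ((c : Nat) : Int) = [pvCharF c] := by
  have hlen : pvAlphabet.length = 64 := by decide
  rw [pvChar1, PySem.List.pyGet?_natCast, List.getElem?_eq_getElem (by omega)]
  simp [pvCharF, List.getD, List.getElem?_eq_getElem (show c < pvAlphabet.length by omega)]

lemma pvBandCast (a b : Nat) : PySem.Int.band (a : Int) (b : Int) = ((a &&& b : Nat) : Int) :=
  PySem.Int.band_natCast a b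

lemma pvBorCast (a b : Nat) : PySem.Int.bor (a : Int) (b : Int) = ((a ||| b : Nat) : Int) :=
  PySem.Int.bor_natCast a b

lemma pvAnd3 (a : Nat) : a &&& 3 = a % 4 := by
  have := Nat.and_two_pow_sub_one_eq_mod a 2
  norm_num at this; exact this

lemma pvAnd15 (a : Nat) : a &&& 15 = a % 16 := by
  have := Nat.and_two_pow_sub_one_eq_mod a 4
  norm_num at this; exact this

lemma pvAnd63 (a : Nat) : a &&& 63 = a % 64 := by
  have := Nat.and_two_pow_sub_one_eq_mod a 6
  norm_num at this; exact this

lemma grp_cast (a1 a2 a3 : Nat) (h1 : a1 < 256) (h2 : a2 < 256) (h3 : a3 < 256) :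
    append3bytes (a1 : Int) (a2 : Int) (a3 : Int) pvAlphabet
      = (pvGrpN a1 a2 a3).map pvCharF := by
  have hc1 : ((a1 : Int) >>> (2 : Nat)) = ((a1 / 4 : Nat) : Int) := by
    rw [pvShiftrCast, Nat.shiftRight_eq_div_pow]
  have hc2 : PySem.Int.bor ((PySem.Int.band (a1 : Int) 0x3) <<< (4 : Nat)) ((a2 : Int) >>> (4 : Nat))
      = ((a1 % 4 * 16 + a2 / 16 : Nat) : Int) := by
    have hb : PySem.Int.band (a1 : Int) 0x3 = ((a1 &&& 3 : Nat) : Int) := by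
      exact_mod_cast pvBandCast a1 3
    rw [hb, pvShiftlCast, pvShiftrCast, pvBorCast]
    congr 1
    rw [pvAnd3, ← Nat.shiftLeft_add_eq_or_of_lt
      (show a2 >>> 4 < 2 ^ 4 by rw [Nat.shiftRight_eq_div_pow]; omega)]
    rw [Nat.shiftLeft_eq, Nat.shiftRight_eq_div_pow]
  have hc3 : PySem.Int.bor ((PySem.Int.band (a2 : Int) 0xF) <<< (2 : Nat)) ((a3 : Int) >>> (6 : Nat))
      = ((a2 % 16 * 4 + a3 / 64 : Nat) : Int) := by
    have hb : PySem.Int.band (a2 : Int) 0xF = ((a2 &&& 15 : Nat) : Int) := by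
      exact_mod_cast pvBandCast a2 15
    rw [hb, pvShiftlCast, pvShiftrCast, pvBorCast]
    congr 1
    rw [pvAnd15, ← Nat.shiftLeft_add_eq_or_of_lt
      (show a3 >>> 6 < 2 ^ 2 by rw [Nat.shiftRight_eq_div_pow]; omega)]
    rw [Nat.shiftLeft_eq, Nat.shiftRight_eq_div_pow]
  have hc4 : PySem.Int.band (a3 : Int) 0x3F = ((a3 % 64 : Nat) : Int) := by
    have hb : PySem.Int.band (a3 : Int) 0x3F = ((a3 &&& 63 : Nat) : Int) := by
      exact_mod_cast pvBandCast a3 63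
    rw [hb, pvAnd63]
  rw [append3bytes]
  simp only [hc1, hc2, hc3, hc4]
  rw [pvChar1_eq _ (by omega), pvChar1_eq _ (by omega), pvChar1_eq _ (by omega),
      pvChar1_eq _ (by omega)]
  simp [pvGrpN]

lemma go_eq (as : List Nat) (h : ∀ a ∈ as, a < 256) :
    encode64Go pvAlphabet (as.map (Nat.cast : Nat → Int)) = (pvAidxN as).map pvCharF := by
  induction as using pvAidxN.induct with
  | case1 => simp [encode64Go, pvAidxN]
  | case2 a1 =>
    have h1 : a1 < 256 := h a1 (by simp)
    have := grp_cast a1 0 0 h1 (by norm_num) (by norm_num)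
    simp only [List.map_cons, List.map_nil, encode64Go, pvAidxN]
    simpa using this
  | case3 a1 a2 =>
    have h1 : a1 < 256 := h a1 (by simp)
    have h2 : a2 < 256 := h a2 (by simp)
    have := grp_cast a1 a2 0 h1 h2 (by norm_num)
    simp only [List.map_cons, List.map_nil, encode64Go, pvAidxN]
    simpa using this
  | case4 a1 a2 a3 rest ih =>
    have h1 : a1 < 256 := h a1 (by simp)
    have h2 : a2 < 256 := h a2 (by simp)
    have h3 : a3 < 256 := h a3 (by simp)
    have hr : ∀ a ∈ rest, a < 256 := fun x hx => h x (by simp [hx])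
    simp only [List.map_cons, encode64Go, pvAidxN, List.map_append,
      grp_cast a1 a2 a3 h1 h2 h3, ih hr]

lemma foldl_cast (as : List Nat) (A : Nat) :
    (as.map (Nat.cast : Nat → Int)).foldl (fun acc b => acc * 256 + b) (A : Int)
      = ((as.foldl (fun a b => a * 256 + b) A : Nat) : Int) := by
  induction as generalizing A with
  | nil => simp
  | cons a as ih =>
    simp only [List.map_cons, List.foldl_cons]
    rw [show ((A : Int) * 256 + (a : Int)) = ((A * 256 + a : Nat) : Int) from by push_cast; ring,
        ih]

lemma alt_eq (as : List Nat) :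
    encode64_alt (as.map (Nat.cast : Nat → Int)) = String.mk ((pvBidxN as).map pvCharF) := by
  rw [encode64_alt]
  simp only [List.length_map]
  have hpad : (PySem.Int.mod (-((as.length : Nat) : Int)) 3).toNat = pvPad as.length := by
    rw [PySem.Int.mod_eq_emod_of_pos (by norm_num)]
    simp only [pvPad]
    omega
  have h0 := foldl_cast as 0
  norm_num at h0
  rw [hpad, h0]
  congr 1
  rw [pvBidxN, List.map_map]
  apply List.map_congr_left
  intro k _
  rw [show List.foldl (fun a b => a * 256 + b) 0 as = pvVal as from rfl]
  have hnum : ((pvVal as : Nat) : Int) * 256 ^ pvPad as.length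
      = ((pvVal as * 256 ^ pvPad as.length : Nat) : Int) := by push_cast; ring
  rw [hnum, pvShiftrCast]
  have hb : PySem.Int.band ((((pvVal as * 256 ^ pvPad as.length)
        >>> ((as.length + pvPad as.length) * 8 - 6 * (k + 1)) : Nat) : Int)) 0x3F
      = (((pvVal as * 256 ^ pvPad as.length)
        >>> ((as.length + pvPad as.length) * 8 - 6 * (k + 1)) &&& 63 : Nat) : Int) := by
    exact_mod_cast pvBandCast _ 63
  rw [hb, pvAnd63, Nat.shiftRight_eq_div_pow]
  rw [PySem.List.pyGet?_natCast]
  have hlt : pvVal as * 256 ^ pvPad as.length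
      / 2 ^ ((as.length + pvPad as.length) * 8 - 6 * (k + 1)) % 64 < pvAlphabet.length := by
    have : pvAlphabet.length = 64 := by decide
    omega
  rw [List.getElem?_eq_getElem hlt]
  simp [pvCharF, List.getD, List.getElem?_eq_getElem hlt]

lemma pvMapToNat (l : List Int) (h : ∀ b ∈ l, 0 ≤ b) :
    (l.map Int.toNat).map (Nat.cast : Nat → Int) = l := by
  induction l with
  | nil => simp
  | cons b bs ih =>
    have hb := h b (by simp)
    rw [List.map_cons, List.map_cons, Int.toNat_of_nonneg hb,
        ih (fun x hx => h x (List.mem_cons_of_mem _ hx))]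

-- ===== VERDICT (by name: the statement is the Claim_ definition above) =====
theorem encode64_spec : Claim_equal_encode64 := by
  intro data _ hpre
  have hmap : (data.map Int.toNat).map (Nat.cast : Nat → Int) = data :=
    pvMapToNat data (fun b hb => (hpre b hb).1)
  have hbound : ∀ a ∈ data.map Int.toNat, a < 256 := by
    intro a ha
    simp only [List.mem_map] at ha
    obtain ⟨b, hb, rfl⟩ := ha
    have := hpre b hb
    omega
  show encode64 data = encode64_alt data
  rw [← hmap, encode64, go_eq _ hbound, pvAidxN_eq_pvBidxN _ hbound, alt_eq]
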